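-- pv_equiv track=rewrite | github.com/ilyakarelcev/Bioinformatics | protein_alignment_streamlit/app.py | position_labels
-- ===== SOURCE A (Python) =====
-- def position_labels(aligned: str) -> list[str]:
--     labels: list[str] = []
--     position = 0
--     for aa in aligned:
--         if aa == "-":
--             labels.append("")
--             continue
--         position += 1
--         labels.append(str(position) if position == 1 or position % 10 == 0 else "")
--     return labels
-- ===== SOURCE B (Python) =====
-- def position_labels(aligned: str) -> list[str]:
--     # Pass 1: running non-gap count per character (prefix sums of is-residue flags).
--     counts: list[int] = []
--     total = 0
--     for c in aligned:
--         total += (c != "-")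
--         counts.append(total)
--     # Pass 2: turn each (char, count) pair into its tick label.
--     return ["" if c == "-" else (str(k) if k == 1 or k % 10 == 0 else "")
--             for c, k in zip(aligned, counts)]
-- ===== Notes on version B (the rewrite author's own statement) =====
-- stated objective: alternative
-- what changed: B replaces A's single loop threading a mutable position counter and conditional appends with two separated passes: first a prefix-sum table of running non-gap counts, then a zip/comprehension mapping each (char, count) pair to its label.
import Mathlib
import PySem

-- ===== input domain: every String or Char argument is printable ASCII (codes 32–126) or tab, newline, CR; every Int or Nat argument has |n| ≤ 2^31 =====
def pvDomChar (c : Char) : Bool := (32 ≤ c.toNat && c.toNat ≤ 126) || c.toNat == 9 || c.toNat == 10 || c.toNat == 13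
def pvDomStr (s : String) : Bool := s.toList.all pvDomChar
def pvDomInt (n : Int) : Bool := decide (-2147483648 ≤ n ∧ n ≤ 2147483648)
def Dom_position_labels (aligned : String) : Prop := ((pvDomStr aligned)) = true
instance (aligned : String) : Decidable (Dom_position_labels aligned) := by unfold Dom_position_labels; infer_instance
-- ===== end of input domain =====

-- B computes a prefix-sum table of non-gap counts, then labels each (char, count) pair in a
-- second pass, instead of A's single loop threading a mutable counter (objective: alternative).

-- ===== PORT A =====
-- A: one loop over the characters, appending "" for gaps, otherwise incrementing
-- position and appending str(position) at 1 and multiples of 10.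
def position_labels (aligned : String) : List String :=
  (aligned.toList.foldl
    (fun (acc : List String × Int) aa =>
      if aa = '-' then (acc.1 ++ [""], acc.2)
      else (acc.1 ++ [if acc.2 + 1 = 1 ∨ PySem.Int.mod (acc.2 + 1) 10 = 0
                      then PySem.Int.toStr (acc.2 + 1) else ""], acc.2 + 1))
    ([], 0)).1

-- ===== PORT B =====
-- B pass 1: prefix sums of is-residue flags; pass 2: zip chars with counts, map to labels.
def position_labels_alt (aligned : String) : List String :=
  let counts :=
    (aligned.toList.foldl
      (fun (acc : List Int × Int) c =>
        (acc.1 ++ [acc.2 + (if c ≠ '-' then 1 else 0)], acc.2 + (if c ≠ '-' then 1 else 0)))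
      ([], 0)).1
  (aligned.toList.zip counts).map
    (fun p =>
      if p.1 = '-' then ""
      else if p.2 = 1 ∨ PySem.Int.mod p.2 10 = 0 then PySem.Int.toStr p.2 else "")

-- ===== PRECONDITION & SPEC =====
def Spec_position_labels (aligned : String) (out : List String) : Prop := out = position_labels_alt aligned
instance (aligned : String) (out : List String) : Decidable (Spec_position_labels aligned out) := by unfold Spec_position_labels; infer_instance

-- ===== CLAIM (what is proved, stated in full; the proofs are below) =====
def Claim_equal_position_labels : Prop := ∀ (aligned : String), Dom_position_labels aligned → Spec_position_labels aligned (position_labels aligned)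

-- ===== LEMMAS AND PROOFS =====

-- Reference recursion: labels of l when p residues have already been seen.
def pvGo (l : List Char) (p : Int) : List String :=
  match l with
  | [] => []
  | c :: cs =>
    if c = '-' then "" :: pvGo cs p
    else (if p + 1 = 1 ∨ PySem.Int.mod (p + 1) 10 = 0
          then PySem.Int.toStr (p + 1) else "") :: pvGo cs (p + 1)

-- A's fold accumulates exactly pvGo.
lemma pvA_fold (l : List Char) (xs : List String) (p : Int) :
    (l.foldl
      (fun (acc : List String × Int) aa =>
        if aa = '-' then (acc.1 ++ [""], acc.2)
        else (acc.1 ++ [if acc.2 + 1 = 1 ∨ PySem.Int.mod (acc.2 + 1) 10 = 0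
                        then PySem.Int.toStr (acc.2 + 1) else ""], acc.2 + 1))
      (xs, p)).1 = xs ++ pvGo l p := by
  induction l generalizing xs p with
  | nil => simp [pvGo]
  | cons c cs ih =>
    simp only [List.foldl_cons]
    by_cases hc : c = '-'
    · rw [if_pos hc, ih]
      simp [pvGo, hc]
    · rw [if_neg hc, ih]
      simp [pvGo, hc]

-- Reference prefix sums.
def pvCsum (l : List Char) (t : Int) : List Int :=
  match l with
  | [] => []
  | c :: cs =>
    (t + (if c ≠ '-' then 1 else 0)) :: pvCsum cs (t + (if c ≠ '-' then 1 else 0))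

-- B's counts fold accumulates exactly pvCsum.
lemma pvB_fold (l : List Char) (ks : List Int) (t : Int) :
    (l.foldl
      (fun (acc : List Int × Int) c =>
        (acc.1 ++ [acc.2 + (if c ≠ '-' then 1 else 0)], acc.2 + (if c ≠ '-' then 1 else 0)))
      (ks, t)).1 = ks ++ pvCsum l t := by
  induction l generalizing ks t with
  | nil => simp [pvCsum]
  | cons c cs ih =>
    simp only [List.foldl_cons]
    rw [ih]
    simp [pvCsum]

-- Zipping with prefix sums and labeling equals the reference recursion.
lemma pvZip_eq_go (l : List Char) (t : Int) :
    (l.zip (pvCsum l t)).map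
      (fun p =>
        if p.1 = '-' then ""
        else if p.2 = 1 ∨ PySem.Int.mod p.2 10 = 0 then PySem.Int.toStr p.2 else "")
      = pvGo l t := by
  induction l generalizing t with
  | nil => simp [pvCsum, pvGo]
  | cons c cs ih =>
    by_cases hc : c = '-'
    · have h : pvCsum (c :: cs) t = t :: pvCsum cs t := by simp [pvCsum, hc]
      rw [h, List.zip_cons_cons, List.map_cons, ih]
      simp [pvGo, hc]
    · have h : pvCsum (c :: cs) t = (t + 1) :: pvCsum cs (t + 1) := by simp [pvCsum, hc]
      rw [h, List.zip_cons_cons, List.map_cons, ih]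
      simp [pvGo, hc]

-- ===== VERDICT (by name: the statement is the Claim_ definition above) =====
theorem position_labels_spec : Claim_equal_position_labels := by
  intro aligned _
  show position_labels aligned = position_labels_alt aligned
  unfold position_labels position_labels_alt
  rw [pvA_fold]
  simp only [pvB_fold, pvZip_eq_go, List.nil_append]
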